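-- pv_equiv track=rewrite | github.com/Pistonight/botw-qt | cnn/score.py | points_to_intervals
-- ===== SOURCE A (Python) =====
-- def points_to_intervals(points, min_gap):
--     intervals = []
--     current_interval = []
--     for i in range(len(points)):
--         if i == 0:
--             current_interval.append(points[i])
--         else:
--             if points[i] - points[i - 1] > min_gap:
--                 intervals.append(current_interval)
--                 current_interval = []
--             current_interval.append(points[i])
--     intervals.append(current_interval)
--     return [
--         (x[0], x[0]) if len(x) == 1 else (x[0], x[-1]) for x in intervals
--     ]
-- ===== SOURCE B (Python) =====
-- def points_to_intervals(points, min_gap):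
--     start = prev = points[0]
--     out = []
--     for p in points[1:]:
--         if p - prev > min_gap:
--             out.append((start, prev))
--             start = p
--         prev = p
--     out.append((start, prev))
--     return out
-- ===== Notes on version B (the rewrite author's own statement) =====
-- stated objective: simpler
-- what changed: B emits (start, prev) endpoint pairs directly in one pass, replacing A's two-phase construction of a list of group sublists followed by a mapping comprehension.
import Mathlib
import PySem

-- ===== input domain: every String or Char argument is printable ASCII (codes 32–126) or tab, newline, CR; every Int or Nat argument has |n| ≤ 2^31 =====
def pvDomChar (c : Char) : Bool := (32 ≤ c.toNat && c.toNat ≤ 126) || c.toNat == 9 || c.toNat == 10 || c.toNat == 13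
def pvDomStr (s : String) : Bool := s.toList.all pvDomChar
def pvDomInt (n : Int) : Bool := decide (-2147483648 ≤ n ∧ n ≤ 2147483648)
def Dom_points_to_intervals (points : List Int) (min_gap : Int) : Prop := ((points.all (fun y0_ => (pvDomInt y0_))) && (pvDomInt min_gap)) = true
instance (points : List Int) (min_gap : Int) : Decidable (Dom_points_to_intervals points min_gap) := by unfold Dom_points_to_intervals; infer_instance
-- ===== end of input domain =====

-- B replaces A's list-of-group-sublists plus a second mapping pass with a single pass
-- keeping only the running interval endpoints (objective: simpler).

-- ===== PORT A =====
-- the comprehension's body: (x[0], x[0]) if len(x) == 1 else (x[0], x[-1])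
def pvFA (x : List Int) : Int × Int :=
  if x.length == 1 then (PySem.List.pyGetD x 0 0, PySem.List.pyGetD x 0 0)
  else (PySem.List.pyGetD x 0 0, PySem.List.pyGetD x (-1) 0)
-- pyGetD with default 0 is exact here: every index A uses is in range whenever
-- points ≠ []; on points = [] Python raises IndexError (excluded by Pre_).
def points_to_intervals (points : List Int) (min_gap : Int) : List (Int × Int) :=
  let st := (PySem.List.pyRange 0 points.length 1).foldl
    (fun (st : List (List Int) × List Int) i =>
      if i == 0 then (st.1, st.2 ++ [PySem.List.pyGetD points i 0])
      else if PySem.List.pyGetD points i 0 - PySem.List.pyGetD points (i - 1) 0 > min_gap then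
        (st.1 ++ [st.2], [PySem.List.pyGetD points i 0])
      else (st.1, st.2 ++ [PySem.List.pyGetD points i 0]))
    ([], [])
  (st.1 ++ [st.2]).map pvFA

-- ===== PORT B =====
def points_to_intervals_alt (points : List Int) (min_gap : Int) : List (Int × Int) :=
  match points with
  | [] => []  -- Python B raises IndexError on []; excluded by Pre_
  | p0 :: rest =>
    let st := rest.foldl
      (fun (st : Int × Int × List (Int × Int)) p =>
        if p - st.2.1 > min_gap then (p, p, st.2.2 ++ [(st.1, st.2.1)])
        else (st.1, p, st.2.2))
      (p0, p0, [])
    st.2.2 ++ [(st.1, st.2.1)]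

-- ===== PRECONDITION & SPEC =====
-- Pre_ excludes only the empty list, on which both Pythons raise IndexError.
def Pre_points_to_intervals (points : List Int) (min_gap : Int) : Prop := points ≠ []
instance (points : List Int) (min_gap : Int) : Decidable (Pre_points_to_intervals points min_gap) := by unfold Pre_points_to_intervals; infer_instance
def pvWitness_points_to_intervals : List Int × Int := ([1, 2, 7, 8], 2)

def Spec_points_to_intervals (points : List Int) (min_gap : Int) (out : List (Int × Int)) : Prop := out = points_to_intervals_alt points min_gap
instance (points : List Int) (min_gap : Int) (out : List (Int × Int)) : Decidable (Spec_points_to_intervals points min_gap out) := by unfold Spec_points_to_intervals; infer_instance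

-- ===== CLAIM (what is proved, stated in full; the proofs are below) =====
def Claim_equal_points_to_intervals : Prop := ∀ (points : List Int) (min_gap : Int), Dom_points_to_intervals points min_gap → Pre_points_to_intervals points min_gap → Spec_points_to_intervals points min_gap (points_to_intervals points min_gap)

-- ===== LEMMAS AND PROOFS =====

-- common reference recursion: emit endpoint pairs given running start s and previous pr
def pvGo (mg s pr : Int) : List Int → List (Int × Int)
  | [] => [(s, pr)]
  | p :: rest => if p - pr > mg then (s, pr) :: pvGo mg p p rest else pvGo mg s p rest

-- structural version of A's loop over indices ≥ 1, with pr = previous element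
def pvGoA (mg : Int) (ivs : List (List Int)) (cur : List Int) (pr : Int) : List Int → List (List Int)
  | [] => ivs ++ [cur]
  | p :: rest =>
    if p - pr > mg then pvGoA mg (ivs ++ [cur]) [p] p rest
    else pvGoA mg ivs (cur ++ [p]) p rest

lemma pvFA_spec (a : Int) (t : List Int) (pr : Int) (h : (a :: t).getLast (by simp) = pr) :
    pvFA (a :: t) = (a, pr) := by
  subst h
  cases t with
  | nil => simp [pvFA, PySem.List.pyGetD]
  | cons b t' =>
    simp only [pvFA, List.length_cons]
    rw [if_neg (by simp)]
    rw [PySem.List.pyGetD_neg_one (xs := a :: b :: t') (d := 0) (by simp)]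
    simp [PySem.List.pyGetD]

lemma pvGoA_map (mg : Int) (rest : List Int) : ∀ (ivs : List (List Int)) (a : Int) (t : List Int) (pr : Int),
    (a :: t).getLast (by simp) = pr →
    (pvGoA mg ivs (a :: t) pr rest).map pvFA = ivs.map pvFA ++ pvGo mg a pr rest := by
  induction rest with
  | nil =>
    intro ivs a t pr h
    simp [pvGoA, pvGo, pvFA_spec a t pr h]
  | cons p rest ih =>
    intro ivs a t pr h
    simp only [pvGoA, pvGo]
    by_cases hg : p - pr > mg
    · rw [if_pos hg, if_pos hg, ih (ivs ++ [a :: t]) p [] p (by simp)]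
      simp [pvFA_spec a t pr h]
    · rw [if_neg hg, if_neg hg, List.cons_append, ih ivs a (t ++ [p]) p (by simp)]

-- B's fold accumulates exactly pvGo
lemma pvAlt_fold (mg : Int) (rest : List Int) : ∀ (s pr : Int) (out : List (Int × Int)),
    (let st := rest.foldl
      (fun (st : Int × Int × List (Int × Int)) p =>
        if p - st.2.1 > mg then (p, p, st.2.2 ++ [(st.1, st.2.1)])
        else (st.1, p, st.2.2))
      (s, pr, out)
     st.2.2 ++ [(st.1, st.2.1)]) = out ++ pvGo mg s pr rest := by
  induction rest with
  | nil => intro s pr out; simp [pvGo]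
  | cons p rest ih =>
    intro s pr out
    simp only [List.foldl_cons, pvGo]
    by_cases hg : p - pr > mg
    · rw [if_pos hg, if_pos hg, ih p p (out ++ [(s, pr)])]
      simp
    · rw [if_neg hg, if_neg hg, ih s p out]

-- A's indexed fold over [k, len) equals pvGoA on the dropped suffix
lemma pvA_fold (points : List Int) (mg : Int) :
    ∀ (m k : ℕ), k + m = points.length → 1 ≤ k →
    ∀ (ivs : List (List Int)) (cur : List Int),
    (let st := (PySem.List.pyRange k points.length 1).foldl
      (fun (st : List (List Int) × List Int) i =>
        if i == 0 then (st.1, st.2 ++ [PySem.List.pyGetD points i 0])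
        else if PySem.List.pyGetD points i 0 - PySem.List.pyGetD points (i - 1) 0 > mg then
          (st.1 ++ [st.2], [PySem.List.pyGetD points i 0])
        else (st.1, st.2 ++ [PySem.List.pyGetD points i 0]))
      (ivs, cur)
     st.1 ++ [st.2]) = pvGoA mg ivs cur (points[k - 1]!) (points.drop k) := by
  intro m
  induction m with
  | zero =>
    intro k hk hk1 ivs cur
    have h1 : (PySem.List.pyRange (k : Int) (points.length : Int) 1) = [] := by
      apply List.eq_nil_of_length_eq_zero
      rw [PySem.List.length_pyRange_one]
      omega
    have h2 : points.drop k = [] := by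
      apply List.drop_eq_nil_of_le; omega
    simp [h1, h2, pvGoA]
  | succ m ih =>
    intro k hk hk1 ivs cur
    have hklt : k < points.length := by omega
    have hcons : PySem.List.pyRange (k : Int) (points.length : Int) 1 =
        (k : Int) :: PySem.List.pyRange ((k : Int) + 1) (points.length : Int) 1 :=
      PySem.List.pyRange_one_cons (by exact_mod_cast hklt)
    have hdrop : points.drop k = points[k] :: points.drop (k + 1) :=
      List.drop_eq_getElem_cons hklt
    have hgk : PySem.List.pyGetD points (k : Int) 0 = points[k] :=
      PySem.List.pyGetD_ofNat points k 0 hklt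
    have hgk1 : PySem.List.pyGetD points ((k : Int) - 1) 0 = points[k - 1]! := by
      have h1 : ((k : Int) - 1) = ((k - 1 : ℕ) : Int) := by omega
      rw [h1, PySem.List.pyGetD_ofNat points (k - 1) 0 (by omega)]
      rw [getElem!_pos points (k - 1) (by omega)]
    have hk0 : ((k : Int) == 0) = false := by
      simp; omega
    rw [hcons, hdrop]
    simp only [List.foldl_cons, hk0, Bool.false_eq_true, if_false, hgk, hgk1, pvGoA]
    have hidx1 : points[(k + 1) - 1]! = points[k] := by
      rw [show k + 1 - 1 = k from rfl]
      exact getElem!_pos points k hklt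
    by_cases hg : points[k] - points[k - 1]! > mg
    · rw [if_pos hg, if_pos hg]
      rw [show ((k : Int) + 1) = ((k + 1 : ℕ) : Int) by omega]
      rw [ih (k + 1) (by omega) (by omega) (ivs ++ [cur]) [points[k]], hidx1]
    · rw [if_neg hg, if_neg hg]
      rw [show ((k : Int) + 1) = ((k + 1 : ℕ) : Int) by omega]
      rw [ih (k + 1) (by omega) (by omega) ivs (cur ++ [points[k]]), hidx1]

-- ===== VERDICT (by name: the statement is the Claim_ definition above) =====
theorem points_to_intervals_spec : Claim_equal_points_to_intervals := by
  intro points min_gap _ hpre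
  unfold Spec_points_to_intervals
  match points, hpre with
  | p0 :: rest, _ =>
    unfold points_to_intervals points_to_intervals_alt
    have hcons : PySem.List.pyRange 0 ((p0 :: rest).length : Int) 1 =
        (0 : Int) :: PySem.List.pyRange 1 ((p0 :: rest).length : Int) 1 :=
      PySem.List.pyRange_one_cons (by rw [List.length_cons]; omega)
    rw [hcons]
    simp only [List.foldl_cons]
    rw [if_pos (by decide)]
    have hg0 : PySem.List.pyGetD (p0 :: rest) (0 : Int) 0 = p0 := by
      exact PySem.List.pyGetD_ofNat (p0 :: rest) 0 0 (by simp)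
    rw [hg0]
    have hA := pvA_fold (p0 :: rest) min_gap rest.length 1 (by rw [List.length_cons]; omega) (le_refl 1) [] [p0]
    simp only [Nat.cast_one] at hA
    simp only [List.nil_append]
    rw [hA]
    have hgoA := pvGoA_map min_gap (( p0 :: rest).drop 1) [] p0 [] p0 (by simp)
    have hidx : (p0 :: rest)[(1 : ℕ) - 1]! = p0 := by simp
    rw [hidx]
    simp only [List.map_nil, List.nil_append] at hgoA
    rw [show (p0 :: rest).drop 1 = rest from rfl] at hgoA
    rw [show List.drop 1 (p0 :: rest) = rest from rfl, hgoA]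
    have hB := pvAlt_fold min_gap rest p0 p0 []
    simp only [List.nil_append] at hB
    exact hB.symm
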